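-- pv_equiv track=rewrite | github.com/romeorizzi/temi_prog_public | 2019.02.27.recupero/all-CMS-submissions-2019-02-27/20190227T102031.VR429228000.conta-minimi-storici.py | conta_minimi_storici_pari
-- ===== SOURCE A (Python) =====
-- def conta_minimi_storici_pari(st_list):
--     s=len(st_list)
--     i=0
--     j=0
--     count=0
--     while(i<s):
--         j=0
--         t=True
--         while(j<i):
--             if st_list[j]<st_list[i]:
--                 t=False
--             j=j+1
--         if t==True:
--             if (st_list[i]%2)==0:
--                 count=count+1
--         i=i+1
--
--
--     return count # risposta corretta ad esempio se tutti i numeri sono dispari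
-- ===== SOURCE B (Python) =====
-- def conta_minimi_storici_pari(st_list):
--     count = 0
--     running = None  # minimum of elements seen so far
--     for x in st_list:
--         if (running is None or x <= running) and x % 2 == 0:
--             count += 1
--         if running is None or x < running:
--             running = x
--     return count
-- ===== Notes on version B (the rewrite author's own statement) =====
-- stated objective: faster
-- what changed: Replaced the quadratic double loop (rescanning the whole prefix for each element) with a single pass that tracks the running minimum and counts even elements not exceeding it.
import Mathlib
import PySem

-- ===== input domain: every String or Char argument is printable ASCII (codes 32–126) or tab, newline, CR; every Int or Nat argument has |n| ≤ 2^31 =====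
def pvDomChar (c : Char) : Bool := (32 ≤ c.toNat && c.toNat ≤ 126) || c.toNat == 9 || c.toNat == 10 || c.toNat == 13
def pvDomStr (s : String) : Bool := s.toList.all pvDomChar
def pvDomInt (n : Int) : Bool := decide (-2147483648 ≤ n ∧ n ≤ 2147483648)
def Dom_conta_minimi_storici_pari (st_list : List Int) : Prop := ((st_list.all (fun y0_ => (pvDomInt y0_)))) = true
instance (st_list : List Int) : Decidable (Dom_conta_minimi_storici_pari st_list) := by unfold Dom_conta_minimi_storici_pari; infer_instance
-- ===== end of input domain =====

-- B replaces A's quadratic prefix-rescan with one pass tracking the running minimum (objective: faster, asymptotic).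

-- ===== PORT A =====
-- A's two while loops become folds over index ranges; st_list[j] is indexed with a
-- nonnegative in-range index everywhere, so List.getD is exact here; % 2 on Int is
-- Python-exact for the positive divisor 2.
def conta_minimi_storici_pari (st_list : List Int) : Int :=
  (List.range st_list.length).foldl (fun count i =>
    let t := (List.range i).foldl
      (fun t j => if st_list.getD j 0 < st_list.getD i 0 then false else t) true
    if t = true then
      (if st_list.getD i 0 % 2 = 0 then count + 1 else count)
    else count) 0

-- ===== PORT B =====
-- one fold carrying (running minimum so far : Option Int, count)
def pvStepB (s : Option Int × Int) (x : Int) : Option Int × Int :=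
  let count :=
    if (match s.1 with | none => true | some m => decide (x ≤ m)) && decide (x % 2 = 0)
    then s.2 + 1 else s.2
  let running :=
    match s.1 with | none => some x | some m => if x < m then some x else some m
  (running, count)

def conta_minimi_storici_pari_alt (st_list : List Int) : Int :=
  (st_list.foldl pvStepB (none, 0)).2

-- ===== PRECONDITION & SPEC =====
def Spec_conta_minimi_storici_pari (st_list : List Int) (out : Int) : Prop := out = conta_minimi_storici_pari_alt st_list
instance (st_list : List Int) (out : Int) : Decidable (Spec_conta_minimi_storici_pari st_list out) := by unfold Spec_conta_minimi_storici_pari; infer_instance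

-- ===== CLAIM (what is proved, stated in full; the proofs are below) =====
def Claim_equal_conta_minimi_storici_pari : Prop := ∀ (st_list : List Int), Dom_conta_minimi_storici_pari st_list → Spec_conta_minimi_storici_pari st_list (conta_minimi_storici_pari st_list)

-- ===== LEMMAS AND PROOFS =====

-- the inner flag loop computes "no scanned element satisfies p"
theorem pv_foldl_flag (l : List Nat) (p : Nat → Prop) [DecidablePred p] (t : Bool) :
    l.foldl (fun t j => if p j then false else t) t
      = (t && !(l.any fun j => decide (p j))) := by
  induction l generalizing t with
  | nil => simp
  | cons a l ih =>
    rw [List.foldl_cons, List.any_cons, ih]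
    by_cases hp : p a <;> simp [hp]

-- A on a snoc: the old count plus one new test on the whole prefix
theorem pv_A_snoc (st : List Int) (x : Int) :
    conta_minimi_storici_pari (st ++ [x]) =
      conta_minimi_storici_pari st +
        (if (∀ e ∈ st, x ≤ e) ∧ x % 2 = 0 then 1 else 0) := by
  unfold conta_minimi_storici_pari
  rw [List.length_append, List.length_singleton, List.range_succ, List.foldl_append]
  have hget : ∀ j, j < st.length → (st ++ [x]).getD j 0 = st.getD j 0 := by
    intro j hj
    simp [List.getD, List.getElem?_append_left hj]
  have hx : (st ++ [x]).getD st.length 0 = x := by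
    simp [List.getD]
  have hcongr :
      (List.range st.length).foldl (fun count i =>
        let t := (List.range i).foldl
          (fun t j => if (st ++ [x]).getD j 0 < (st ++ [x]).getD i 0 then false else t) true
        if t = true then
          (if (st ++ [x]).getD i 0 % 2 = 0 then count + 1 else count)
        else count) (0 : Int)
      = (List.range st.length).foldl (fun count i =>
        let t := (List.range i).foldl
          (fun t j => if st.getD j 0 < st.getD i 0 then false else t) true
        if t = true then
          (if st.getD i 0 % 2 = 0 then count + 1 else count)
        else count) (0 : Int) := by
    apply PySem.List.foldl_congr_mem
    intro acc i hi
    have hi' : i < st.length := List.mem_range.mp hi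
    have hbody : (List.range i).foldl
        (fun t j => if (st ++ [x]).getD j 0 < (st ++ [x]).getD i 0 then false else t) true
        = (List.range i).foldl
        (fun t j => if st.getD j 0 < st.getD i 0 then false else t) true := by
      apply PySem.List.foldl_congr_mem
      intro t j hj
      have hj' : j < st.length := Nat.lt_trans (List.mem_range.mp hj) hi'
      rw [hget j hj', hget i hi']
    rw [hbody, hget i hi']
  rw [hcongr]
  -- the last iteration (i = st.length)
  have hlast : ∀ c : Int,
      (let t := (List.range st.length).foldl
        (fun t j => if (st ++ [x]).getD j 0 < (st ++ [x]).getD st.length 0 then false else t) true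
      if t = true then
        (if (st ++ [x]).getD st.length 0 % 2 = 0 then c + 1 else c)
      else c)
      = c + (if (∀ e ∈ st, x ≤ e) ∧ x % 2 = 0 then 1 else 0) := by
    intro c
    simp only [hx]
    have : (List.range st.length).foldl
        (fun t j => if (st ++ [x]).getD j 0 < x then false else t) true
        = (List.range st.length).foldl
        (fun t j => if st.getD j 0 < x then false else t) true := by
      apply PySem.List.foldl_congr_mem
      intro t j hj
      rw [hget j (List.mem_range.mp hj)]
    rw [this, pv_foldl_flag]
    have hiff : ((List.range st.length).any fun j => decide (st.getD j 0 < x)) = true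
        ↔ ∃ e ∈ st, e < x := by
      simp only [List.any_eq_true, List.mem_range, decide_eq_true_eq]
      constructor
      · rintro ⟨j, hj, hlt⟩
        refine ⟨st.getD j 0, ?_, hlt⟩
        simp [List.getD, List.getElem?_eq_getElem hj]
      · rintro ⟨e, he, hlt⟩
        obtain ⟨j, hj, rfl⟩ := List.mem_iff_getElem.mp he
        exact ⟨j, hj, by simpa [List.getD, List.getElem?_eq_getElem hj] using hlt⟩
    have hany : ((List.range st.length).any fun j => decide (st.getD j 0 < x))
        = !decide (∀ e ∈ st, x ≤ e) := by
      by_cases hall : ∀ e ∈ st, x ≤ e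
      · rw [decide_eq_true hall, Bool.not_true, Bool.eq_false_iff]
        intro h
        obtain ⟨e, he, hlt⟩ := hiff.mp h
        exact absurd (hall e he) (not_le.mpr hlt)
      · rw [decide_eq_false hall, Bool.not_false, hiff]
        push Not at hall
        obtain ⟨e, he, hlt⟩ := hall
        exact ⟨e, he, hlt⟩
    rw [hany]
    by_cases hall : ∀ e ∈ st, x ≤ e <;> by_cases hev : x % 2 = 0 <;>
      simp [hall, hev] <;> split_ifs <;> rfl
  rw [List.foldl_cons, List.foldl_nil]
  exact hlast _

-- B's fold state: the count is A's count and the first component bounds the list from below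
theorem pv_B_inv (st : List Int) :
    (st.foldl pvStepB (none, 0)).2 = conta_minimi_storici_pari st ∧
      ∀ x : Int,
        ((match (st.foldl pvStepB (none, 0)).1 with
          | none => true
          | some m => decide (x ≤ m)) = true) ↔ (∀ e ∈ st, x ≤ e) := by
  induction st using List.reverseRecOn with
  | nil =>
    constructor
    · simp [conta_minimi_storici_pari]
    · intro x; simp
  | append_singleton st x ih =>
    obtain ⟨ihc, ihm⟩ := ih
    rw [List.foldl_append, List.foldl_cons, List.foldl_nil]
    set s := st.foldl pvStepB (none, 0) with hs
    constructor
    · -- count component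
      show (pvStepB s x).2 = _
      rw [pv_A_snoc]
      unfold pvStepB
      simp only
      have hcond : ((match s.1 with | none => true | some m => decide (x ≤ m))
            && decide (x % 2 = 0)) = true ↔ ((∀ e ∈ st, x ≤ e) ∧ x % 2 = 0) := by
        rw [Bool.and_eq_true, decide_eq_true_eq, ihm x]
      by_cases h : (∀ e ∈ st, x ≤ e) ∧ x % 2 = 0
      · rw [if_pos (hcond.mpr h), if_pos h, ihc]
      · rw [if_neg (fun hb => h (hcond.mp hb)), if_neg h, ihc, add_zero]
    · -- min component
      intro y
      show ((match (pvStepB s x).1 with | none => true | some m => decide (y ≤ m)) = true) ↔ _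
      unfold pvStepB
      simp only
      cases hm : s.1 with
      | none =>
        have := ihm y
        rw [hm] at this
        simp only [decide_eq_true_eq, List.mem_append, List.mem_singleton]
        constructor
        · intro hyx e he
          rcases he with he | rfl
          · exact this.mp rfl e he
          · exact hyx
        · intro h; exact h x (Or.inr rfl)
      | some m =>
        have hold := ihm y
        rw [hm] at hold
        by_cases hlt : x < m
        · simp only [if_pos hlt, decide_eq_true_eq, List.mem_append, List.mem_singleton] at *
          constructor
          · intro hyx e he
            rcases he with he | rfl
            · exact hold.mp (le_trans hyx (le_of_lt hlt)) e he
            · exact hyx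
          · intro h; exact h x (Or.inr rfl)
        · simp only [if_neg hlt, decide_eq_true_eq, List.mem_append, List.mem_singleton] at *
          push Not at hlt
          constructor
          · intro hym e he
            rcases he with he | rfl
            · exact hold.mp hym e he
            · exact le_trans hym hlt
          · intro h; exact hold.mpr (fun e he => h e (Or.inl he))

-- ===== VERDICT (by name: the statement is the Claim_ definition above) =====
theorem conta_minimi_storici_pari_spec : Claim_equal_conta_minimi_storici_pari := by
  intro st_list _
  unfold Spec_conta_minimi_storici_pari conta_minimi_storici_pari_alt
  exact ((pv_B_inv st_list).1).symm
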